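-- pv_equiv track=rewrite | github.com/Mukulsaini9911/healthcare_project | app.py | resolve_specialty
-- ===== SOURCE A (Python) =====
-- CONDITION_SPECIALTY_MAP = {
--     'fever': 'general_physician',
--     'cold': 'general_physician',
--     'cough': 'general_physician',
--     'pneumonia': 'pulmonologist',
--     'dengue': 'infectious_disease',
--     'malaria': 'infectious_disease',
--     'covid-19': 'infectious_disease',
--     'diabetes': 'endocrinologist',
--     'hypertension': 'cardiologist',
--     'asthma': 'pulmonologist',
--     'migraine': 'neurologist',
--     'heart': 'cardiologist',
--     'cancer': 'oncologist',
--     'uti': 'nephrologist',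
--     'gastroenteritis': 'gastroenterologist',
--     'fracture': 'orthopedic',
--     'allergy': 'general_physician'
-- }
--
-- def resolve_specialty(query_lower, condition_key=None):
--     specialty_aliases = {
--         'cardiologist': 'cardiologist',
--         'heart doctor': 'cardiologist',
--         'neurologist': 'neurologist',
--         'brain doctor': 'neurologist',
--         'pulmonologist': 'pulmonologist',
--         'chest doctor': 'pulmonologist',
--         'lung doctor': 'pulmonologist',
--         'endocrinologist': 'endocrinologist',
--         'diabetes doctor': 'endocrinologist',
--         'thyroid doctor': 'endocrinologist',
--         'rheumatologist': 'rheumatologist',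
--         'infection doctor': 'infectious_disease',
--         'infectious disease': 'infectious_disease',
--         'gastroenterologist': 'gastroenterologist',
--         'stomach doctor': 'gastroenterologist',
--         'nephrologist': 'nephrologist',
--         'kidney doctor': 'nephrologist',
--         'oncologist': 'oncologist',
--         'cancer doctor': 'oncologist',
--         'psychiatrist': 'psychiatrist',
--         'orthopedic': 'orthopedic',
--         'ortho': 'orthopedic',
--         'bone doctor': 'orthopedic',
--         'general physician': 'general_physician',
--         'physician': 'general_physician'
--     }
--
--     for phrase, specialty in sorted(specialty_aliases.items(), key=lambda item: len(item[0]), reverse=True):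
--         if phrase in query_lower:
--             return specialty
--
--     if condition_key and condition_key in CONDITION_SPECIALTY_MAP:
--         return CONDITION_SPECIALTY_MAP[condition_key]
--
--     if any(term in query_lower for term in ['chest pain', 'heartbeat', 'pressure']):
--         return 'cardiologist'
--     if any(term in query_lower for term in ['headache', 'migraine', 'dizziness', 'seizure']):
--         return 'neurologist'
--     if any(term in query_lower for term in ['cough', 'breathing', 'asthma', 'pneumonia']):
--         return 'pulmonologist'
--     if any(term in query_lower for term in ['vomit', 'stomach', 'loose motion', 'diarrhea']):
--         return 'gastroenterologist'
--     if any(term in query_lower for term in ['fracture', 'bone', 'joint', 'back pain']):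
--         return 'orthopedic'
--     return 'general_physician'
-- ===== SOURCE B (Python) =====
-- CONDITION_SPECIALTY_MAP = {
--     'fever': 'general_physician',
--     'cold': 'general_physician',
--     'cough': 'general_physician',
--     'pneumonia': 'pulmonologist',
--     'dengue': 'infectious_disease',
--     'malaria': 'infectious_disease',
--     'covid-19': 'infectious_disease',
--     'diabetes': 'endocrinologist',
--     'hypertension': 'cardiologist',
--     'asthma': 'pulmonologist',
--     'migraine': 'neurologist',
--     'heart': 'cardiologist',
--     'cancer': 'oncologist',
--     'uti': 'nephrologist',
--     'gastroenteritis': 'gastroenterologist',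
--     'fracture': 'orthopedic',
--     'allergy': 'general_physician'
-- }
--
-- SPECIALTY_ALIASES = [
--     ('cardiologist', 'cardiologist'),
--     ('heart doctor', 'cardiologist'),
--     ('neurologist', 'neurologist'),
--     ('brain doctor', 'neurologist'),
--     ('pulmonologist', 'pulmonologist'),
--     ('chest doctor', 'pulmonologist'),
--     ('lung doctor', 'pulmonologist'),
--     ('endocrinologist', 'endocrinologist'),
--     ('diabetes doctor', 'endocrinologist'),
--     ('thyroid doctor', 'endocrinologist'),
--     ('rheumatologist', 'rheumatologist'),
--     ('infection doctor', 'infectious_disease'),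
--     ('infectious disease', 'infectious_disease'),
--     ('gastroenterologist', 'gastroenterologist'),
--     ('stomach doctor', 'gastroenterologist'),
--     ('nephrologist', 'nephrologist'),
--     ('kidney doctor', 'nephrologist'),
--     ('oncologist', 'oncologist'),
--     ('cancer doctor', 'oncologist'),
--     ('psychiatrist', 'psychiatrist'),
--     ('orthopedic', 'orthopedic'),
--     ('ortho', 'orthopedic'),
--     ('bone doctor', 'orthopedic'),
--     ('general physician', 'general_physician'),
--     ('physician', 'general_physician'),
-- ]
--
-- FALLBACK_RULES = [
--     (['chest pain', 'heartbeat', 'pressure'], 'cardiologist'),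
--     (['headache', 'migraine', 'dizziness', 'seizure'], 'neurologist'),
--     (['cough', 'breathing', 'asthma', 'pneumonia'], 'pulmonologist'),
--     (['vomit', 'stomach', 'loose motion', 'diarrhea'], 'gastroenterologist'),
--     (['fracture', 'bone', 'joint', 'back pain'], 'orthopedic'),
-- ]
--
-- def resolve_specialty(query_lower, condition_key=None):
--     # single pass: longest matching alias wins; ties go to the earliest entry
--     best_specialty = None
--     best_len = -1
--     for phrase, specialty in SPECIALTY_ALIASES:
--         if len(phrase) > best_len and phrase in query_lower:
--             best_specialty = specialty
--             best_len = len(phrase)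
--     if best_specialty is not None:
--         return best_specialty
--
--     if condition_key and condition_key in CONDITION_SPECIALTY_MAP:
--         return CONDITION_SPECIALTY_MAP[condition_key]
--
--     for terms, specialty in FALLBACK_RULES:
--         if any(term in query_lower for term in terms):
--             return specialty
--     return 'general_physician'
-- ===== Notes on version B (the rewrite author's own statement) =====
-- stated objective: simpler
-- what changed: B replaces A's sort-the-alias-table-then-return-first-match by a single strict-improvement scan over the alias table in its original order (longest match wins, ties to the earliest entry), and replaces the five hard-coded fallback ifs by one loop over a rules table.
import Mathlib
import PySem

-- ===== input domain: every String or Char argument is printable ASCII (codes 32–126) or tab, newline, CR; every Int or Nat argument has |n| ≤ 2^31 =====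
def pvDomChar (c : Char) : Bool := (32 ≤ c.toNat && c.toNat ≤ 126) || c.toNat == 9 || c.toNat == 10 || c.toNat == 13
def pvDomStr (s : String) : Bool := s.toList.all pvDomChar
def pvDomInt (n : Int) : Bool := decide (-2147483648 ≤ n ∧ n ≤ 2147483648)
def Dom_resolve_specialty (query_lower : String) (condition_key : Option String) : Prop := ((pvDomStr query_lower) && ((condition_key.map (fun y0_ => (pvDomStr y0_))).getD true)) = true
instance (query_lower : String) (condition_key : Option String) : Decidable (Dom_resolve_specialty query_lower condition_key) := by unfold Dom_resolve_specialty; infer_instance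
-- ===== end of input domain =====

-- B replaces A's sort-then-first-match over the alias table by a single strict-improvement
-- scan in table order (simpler: no sort), and the five fallback ifs by one table-driven loop.

-- shared data tables (module-level constants in the Python sources)
def pvCondMap : PySem.Dict String String := PySem.Dict.ofList [
  ("fever", "general_physician"), ("cold", "general_physician"), ("cough", "general_physician"),
  ("pneumonia", "pulmonologist"), ("dengue", "infectious_disease"), ("malaria", "infectious_disease"),
  ("covid-19", "infectious_disease"), ("diabetes", "endocrinologist"), ("hypertension", "cardiologist"),
  ("asthma", "pulmonologist"), ("migraine", "neurologist"), ("heart", "cardiologist"),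
  ("cancer", "oncologist"), ("uti", "nephrologist"), ("gastroenteritis", "gastroenterologist"),
  ("fracture", "orthopedic"), ("allergy", "general_physician")]

-- A's specialty_aliases dict has 25 distinct keys: its .items() in insertion order is this list
def pvAliases : List (String × String) := [
  ("cardiologist", "cardiologist"), ("heart doctor", "cardiologist"),
  ("neurologist", "neurologist"), ("brain doctor", "neurologist"),
  ("pulmonologist", "pulmonologist"), ("chest doctor", "pulmonologist"), ("lung doctor", "pulmonologist"),
  ("endocrinologist", "endocrinologist"), ("diabetes doctor", "endocrinologist"), ("thyroid doctor", "endocrinologist"),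
  ("rheumatologist", "rheumatologist"),
  ("infection doctor", "infectious_disease"), ("infectious disease", "infectious_disease"),
  ("gastroenterologist", "gastroenterologist"), ("stomach doctor", "gastroenterologist"),
  ("nephrologist", "nephrologist"), ("kidney doctor", "nephrologist"),
  ("oncologist", "oncologist"), ("cancer doctor", "oncologist"),
  ("psychiatrist", "psychiatrist"),
  ("orthopedic", "orthopedic"), ("ortho", "orthopedic"), ("bone doctor", "orthopedic"),
  ("general physician", "general_physician"), ("physician", "general_physician")]

-- ===== PORT A =====
def resolve_specialty (query_lower : String) (condition_key : Option String) : String :=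
  -- for phrase, specialty in sorted(items, key=len(phrase), reverse=True): if phrase in q: return specialty
  match (PySem.List.sorted pvAliases (fun it => PySem.Str.len it.1) true).find?
        (fun it => PySem.Str.isIn it.1 query_lower) with
  | some it => it.2
  | none =>
    -- if condition_key and condition_key in CONDITION_SPECIALTY_MAP: return CONDITION_SPECIALTY_MAP[condition_key]
    match (match condition_key with
           | none => none
           | some k => if k == "" then none else pvCondMap.get? k) with
    | some v => v
    | none =>
      if (["chest pain", "heartbeat", "pressure"]).any (fun t => PySem.Str.isIn t query_lower) then "cardiologist"
      else if (["headache", "migraine", "dizziness", "seizure"]).any (fun t => PySem.Str.isIn t query_lower) then "neurologist"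
      else if (["cough", "breathing", "asthma", "pneumonia"]).any (fun t => PySem.Str.isIn t query_lower) then "pulmonologist"
      else if (["vomit", "stomach", "loose motion", "diarrhea"]).any (fun t => PySem.Str.isIn t query_lower) then "gastroenterologist"
      else if (["fracture", "bone", "joint", "back pain"]).any (fun t => PySem.Str.isIn t query_lower) then "orthopedic"
      else "general_physician"

-- ===== PORT B =====
def pvRules : List (List String × String) := [
  (["chest pain", "heartbeat", "pressure"], "cardiologist"),
  (["headache", "migraine", "dizziness", "seizure"], "neurologist"),
  (["cough", "breathing", "asthma", "pneumonia"], "pulmonologist"),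
  (["vomit", "stomach", "loose motion", "diarrhea"], "gastroenterologist"),
  (["fracture", "bone", "joint", "back pain"], "orthopedic")]

def resolve_specialty_alt (query_lower : String) (condition_key : Option String) : String :=
  -- single pass: longest matching alias wins; ties go to the earliest entry (strict >)
  let best := pvAliases.foldl
    (fun acc it =>
      if decide (acc.2 < PySem.Str.len it.1) && PySem.Str.isIn it.1 query_lower
      then (some it.2, PySem.Str.len it.1) else acc)
    ((none : Option String), (-1 : Int))
  match best.1 with
  | some s => s
  | none =>
    match (match condition_key with
           | none => none
           | some k => if k == "" then none else pvCondMap.get? k) with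
    | some v => v
    | none =>
      match pvRules.find? (fun r => r.1.any (fun t => PySem.Str.isIn t query_lower)) with
      | some r => r.2
      | none => "general_physician"

-- ===== PRECONDITION & SPEC =====
def Spec_resolve_specialty (query_lower : String) (condition_key : Option String) (out : String) : Prop := out = resolve_specialty_alt query_lower condition_key
instance (query_lower : String) (condition_key : Option String) (out : String) : Decidable (Spec_resolve_specialty query_lower condition_key out) := by unfold Spec_resolve_specialty; infer_instance

-- ===== CLAIM (what is proved, stated in full; the proofs are below) =====
def Claim_equal_resolve_specialty : Prop := ∀ (query_lower : String) (condition_key : Option String), Dom_resolve_specialty query_lower condition_key → Spec_resolve_specialty query_lower condition_key (resolve_specialty query_lower condition_key)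

-- ===== LEMMAS AND PROOFS =====

-- B's scan state (best specialty, best length) encoding an optional best alias entry
def pvEnc : Option (String × String) → Option String × Int
  | none => (none, -1)
  | some it => (some it.2, PySem.Str.len it.1)

def pvStep (q : String) (acc : Option String × Int) (it : String × String) : Option String × Int :=
  if decide (acc.2 < PySem.Str.len it.1) && PySem.Str.isIn it.1 q then (some it.2, PySem.Str.len it.1) else acc

-- inserting x into a desc-sorted list and taking the first match = one strict-improvement step
theorem pvInsertBy_find (q : String) (x : String × String) (S : List (String × String))
    (hS : S.Pairwise (fun a b => PySem.Str.len b.1 ≤ PySem.Str.len a.1)) :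
    pvEnc ((PySem.List.insertBy (fun a b => decide (PySem.Str.len b.1 < PySem.Str.len a.1)) x S).find?
      (fun it => PySem.Str.isIn it.1 q))
    = pvStep q (pvEnc (S.find? (fun it => PySem.Str.isIn it.1 q))) x := by
  induction S with
  | nil =>
      simp only [PySem.List.insertBy, List.find?_nil]
      cases hx : PySem.Str.isIn x.1 q
      · rw [List.find?_cons_of_neg (by simpa using hx)]
        simp only [PySem.Str.isIn_eq] at hx
        simp [pvEnc, pvStep, hx]
      · rw [List.find?_cons_of_pos (by simpa using hx)]
        simp only [PySem.Str.isIn_eq] at hx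
        simp [pvEnc, pvStep, hx]
        omega
  | cons y t ih =>
      rcases List.pairwise_cons.mp hS with ⟨hy, ht⟩
      cases hb : decide (PySem.Str.len y.1 < PySem.Str.len x.1)
      · -- x is not longer than y: x goes after y
        have hIB : PySem.List.insertBy (fun a b => decide (PySem.Str.len b.1 < PySem.Str.len a.1)) x (y :: t)
            = y :: PySem.List.insertBy (fun a b => decide (PySem.Str.len b.1 < PySem.Str.len a.1)) x t := by
          simp only [PySem.List.insertBy, hb, Bool.false_eq_true, if_false]
        rw [hIB]
        cases hyq : PySem.Str.isIn y.1 q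
        · rw [List.find?_cons_of_neg (by simpa using hyq), List.find?_cons_of_neg (by simpa using hyq)]
          exact ih ht
        · rw [List.find?_cons_of_pos (by simpa using hyq), List.find?_cons_of_pos (by simpa using hyq)]
          have hle : ¬ (PySem.Str.len y.1 < PySem.Str.len x.1) := of_decide_eq_false hb
          simp only [PySem.Str.len_eq, String.length_toList] at hle
          simp [pvEnc, pvStep]
          omega
      · -- x is strictly longer than y: x goes in front
        have hIB : PySem.List.insertBy (fun a b => decide (PySem.Str.len b.1 < PySem.Str.len a.1)) x (y :: t)
            = x :: y :: t := by
          simp only [PySem.List.insertBy, hb, if_true]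
        rw [hIB]
        have hlt : PySem.Str.len y.1 < PySem.Str.len x.1 := of_decide_eq_true hb
        cases hx : PySem.Str.isIn x.1 q
        · rw [List.find?_cons_of_neg (by simpa using hx)]
          simp only [PySem.Str.isIn_eq] at hx
          simp [pvStep, hx]
        · rw [List.find?_cons_of_pos (by simpa using hx)]
          rcases hfz : (y :: t).find? (fun it => PySem.Str.isIn it.1 q) with _ | z
          · rw [hfz]
            simp only [PySem.Str.isIn_eq] at hx
            simp [pvEnc, pvStep, hx]
            omega
          · have hz : z ∈ y :: t := List.mem_of_find?_eq_some hfz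
            have hzlen : PySem.Str.len z.1 ≤ PySem.Str.len y.1 := by
              rcases List.mem_cons.mp hz with h | h
              · simp [h]
              · exact hy z h
            have hzx : PySem.Str.len z.1 < PySem.Str.len x.1 := lt_of_le_of_lt hzlen hlt
            rw [hfz]
            simp only [PySem.Str.isIn_eq] at hx
            simp only [PySem.Str.len_eq, String.length_toList] at hzx
            simp [pvEnc, pvStep, hx]
            omega

-- first match of the stable descending sort = left-to-right strict-improvement scan
theorem pvMain (q : String) (L : List (String × String)) :
    pvEnc ((PySem.List.sorted L (fun it => PySem.Str.len it.1) true).find?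
      (fun it => PySem.Str.isIn it.1 q))
    = L.foldl (pvStep q) (none, -1) := by
  induction L using List.reverseRecOn with
  | nil => simp [PySem.List.sorted, pvEnc]
  | append_singleton L x ih =>
      have hsnoc : PySem.List.sorted (L ++ [x]) (fun it => PySem.Str.len it.1) true
          = PySem.List.insertBy (fun a b => decide (PySem.Str.len b.1 < PySem.Str.len a.1)) x
              (PySem.List.sorted L (fun it => PySem.Str.len it.1) true) := by
        rw [PySem.List.sorted_rev_eq_foldl_insertBy, PySem.List.sorted_rev_eq_foldl_insertBy,
          List.foldl_append]
        simp
      rw [hsnoc, List.foldl_append]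
      simp only [List.foldl_cons, List.foldl_nil]
      rw [pvInsertBy_find q x _ (PySem.List.sorted_pairwise_rev L (fun it => PySem.Str.len it.1)), ih]

-- the five ordered any-fallbacks = first match over the rules table
theorem pvFallback (q : String) :
    (match pvRules.find? (fun r => r.1.any (fun t => PySem.Str.isIn t q)) with
     | some r => r.2
     | none => "general_physician")
    = (if (["chest pain", "heartbeat", "pressure"]).any (fun t => PySem.Str.isIn t q) then "cardiologist"
      else if (["headache", "migraine", "dizziness", "seizure"]).any (fun t => PySem.Str.isIn t q) then "neurologist"
      else if (["cough", "breathing", "asthma", "pneumonia"]).any (fun t => PySem.Str.isIn t q) then "pulmonologist"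
      else if (["vomit", "stomach", "loose motion", "diarrhea"]).any (fun t => PySem.Str.isIn t q) then "gastroenterologist"
      else if (["fracture", "bone", "joint", "back pain"]).any (fun t => PySem.Str.isIn t q) then "orthopedic"
      else "general_physician") := by
  unfold pvRules
  simp only [List.find?]
  cases h1 : (["chest pain", "heartbeat", "pressure"]).any (fun t => PySem.Str.isIn t q) <;>
  cases h2 : (["headache", "migraine", "dizziness", "seizure"]).any (fun t => PySem.Str.isIn t q) <;>
  cases h3 : (["cough", "breathing", "asthma", "pneumonia"]).any (fun t => PySem.Str.isIn t q) <;>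
  cases h4 : (["vomit", "stomach", "loose motion", "diarrhea"]).any (fun t => PySem.Str.isIn t q) <;>
  cases h5 : (["fracture", "bone", "joint", "back pain"]).any (fun t => PySem.Str.isIn t q) <;>
    simp only [h1, h2, h3, h4, h5] <;> rfl

-- ===== VERDICT (by name: the statement is the Claim_ definition above) =====
theorem resolve_specialty_spec : Claim_equal_resolve_specialty := by
  intro q ck hdom
  clear hdom
  unfold Spec_resolve_specialty resolve_specialty resolve_specialty_alt
  rw [show pvAliases.foldl
        (fun acc it =>
          if decide (acc.2 < PySem.Str.len it.1) && PySem.Str.isIn it.1 q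
          then (some it.2, PySem.Str.len it.1) else acc)
        ((none : Option String), (-1 : Int))
      = pvAliases.foldl (pvStep q) (none, -1) from rfl,
    ← pvMain q pvAliases]
  rcases hf : (PySem.List.sorted pvAliases (fun it => PySem.Str.len it.1) true).find?
      (fun it => PySem.Str.isIn it.1 q) with _ | it
  · rw [hf]
    simp only [pvEnc]
    rcases hck : (match ck with
                  | none => none
                  | some k => if k == "" then none else pvCondMap.get? k : Option String) with _ | v
    · exact (pvFallback q).symm
    · rfl
  · rw [hf]
    rfl
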